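-- pv_equiv track=rewrite | github.com/ln-one/Spectra | backend/services/generation_session_service/tool_refine_builder/mindmap_full_map.py | _compute_subtree_depth
-- ===== SOURCE A (Python) =====
-- from collections import defaultdict, deque
--
-- def _compute_subtree_depth(children_map: dict[str, list[str]], target_id: str) -> int:
--     max_depth = 1
--     queue = deque([(target_id, 1)])
--     while queue:
--         current, depth = queue.popleft()
--         max_depth = max(max_depth, depth)
--         for child_id in children_map.get(current, []):
--             queue.append((child_id, depth + 1))
--     return max_depth
-- ===== SOURCE B (Python) =====
-- def _compute_subtree_depth(children_map: dict[str, list[str]], target_id: str) -> int: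
--     def depth(node):
--         return 1 + max((depth(c) for c in children_map.get(node, [])), default=0)
--     return depth(target_id)
-- ===== Notes on version B (the rewrite author's own statement) =====
-- stated objective: simpler
-- what changed: Replaces the explicit BFS deque of (node, depth) pairs with a direct post-order recursion: depth(node) = 1 + max(depth(child) for child in children_map.get(node, []), default 0).
-- outside the precondition, e.g. on _compute_subtree_depth({'a': ['a']}, 'a'): A does not finish within the time limit, B raises RecursionError
import Mathlib
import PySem

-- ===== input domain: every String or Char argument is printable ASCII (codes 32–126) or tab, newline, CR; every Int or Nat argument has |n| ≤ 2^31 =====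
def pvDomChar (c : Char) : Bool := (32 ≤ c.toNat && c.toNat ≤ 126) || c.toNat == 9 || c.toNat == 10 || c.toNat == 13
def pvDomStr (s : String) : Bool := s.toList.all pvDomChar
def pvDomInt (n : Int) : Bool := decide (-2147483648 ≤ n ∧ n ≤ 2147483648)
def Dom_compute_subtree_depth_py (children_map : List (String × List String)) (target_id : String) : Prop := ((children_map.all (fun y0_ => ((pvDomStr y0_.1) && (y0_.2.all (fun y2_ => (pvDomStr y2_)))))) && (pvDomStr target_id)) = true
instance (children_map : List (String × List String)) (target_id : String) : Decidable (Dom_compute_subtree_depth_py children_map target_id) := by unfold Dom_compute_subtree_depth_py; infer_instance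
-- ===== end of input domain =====

-- B replaces A's explicit BFS deque of (node, depth) pairs by a direct recursion
-- 'depth(node) = 1 + max(depth(child), default 0)' over the tree (objective: simpler).

-- ===== PORT A =====
-- children_map.get(current, []) — association-list lookup via PySem.Dict
def pvChildren (children_map : List (String × List String)) (cur : String) : List String :=
  (PySem.Dict.mk children_map).getD cur []

-- fuel bounds: fuel is only a totality guard for the while-loop; under
-- Pre_ it is proved never to run out (see pvBfsA_eq_M below).
def pvMaxLen (children_map : List (String × List String)) : Nat :=
  children_map.foldl (fun a p => max a p.2.length) 0

def pvFuelA (children_map : List (String × List String)) : Nat :=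
  (pvMaxLen children_map + 1) ^ (children_map.length + 1)

-- the 'while queue:' loop of A, step for step: pop left, update max_depth, append children
def pvBfsA (children_map : List (String × List String)) :
    Nat → List (String × Int) → Int → Int
  | 0, _, max_depth => max_depth
  | _ + 1, [], max_depth => max_depth
  | fuel + 1, (current, depth) :: rest, max_depth =>
      pvBfsA children_map fuel
        (rest ++ (pvChildren children_map current).map (fun c => (c, depth + 1)))
        (max max_depth depth)

def compute_subtree_depth_py (children_map : List (String × List String)) (target_id : String) : Int :=
  pvBfsA children_map (pvFuelA children_map) [(target_id, 1)] 1

-- ===== PORT B =====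
-- depth(node) = 1 + max((depth(c) for c in children_map.get(node, [])), default=0);
-- fuel is a totality guard only: under Pre_ the recursion depth is ≤ length + 1.
def pvDepthB (children_map : List (String × List String)) : Nat → String → Int
  | 0, _ => 1
  | fuel + 1, node =>
      1 + ((pvChildren children_map node).map (pvDepthB children_map fuel)).foldl max 0

def compute_subtree_depth_py_alt (children_map : List (String × List String)) (target_id : String) : Int :=
  pvDepthB children_map (children_map.length + 1) target_id

-- ===== PRECONDITION & SPEC =====
-- any two entries with the same key carry the same child list
def pvPairsOkB : List (String × List String) → Bool
  | [] => true
  | p :: rest => rest.all (fun q => !(p.1 == q.1) || p.2 == q.2) && pvPairsOkB rest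

-- the set of nodes reachable from x: iterate 'add all children' length+1 times
def pvStep (children_map : List (String × List String)) (S : List String) : List String :=
  (S ++ S.flatMap (pvChildren children_map)).dedup

def pvReach (children_map : List (String × List String)) (x : String) : List String :=
  (pvStep children_map)^[children_map.length + 1] [x]

def pvKeys (children_map : List (String × List String)) : List String :=
  (children_map.map Prod.fst).dedup

-- rank of a node = how many distinct keys are reachable from it
def pvRank (children_map : List (String × List String)) (x : String) : Nat :=
  ((pvKeys children_map).filter (fun k => (pvReach children_map x).contains k)).length

-- Pre_ admits exactly the inputs A terminates on: the part of the map reachable from the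
-- target is acyclic — certified by the reachable set being edge-closed and every edge strictly
-- decreasing the key-rank (on a cycle reachable from the target A loops forever and B overflows
-- the stack) — and additionally excludes maps binding a duplicated key to two DIFFERENT child
-- lists, where the Python dict keeps the last binding while the association list keeps the first.
def Pre_compute_subtree_depth_py (children_map : List (String × List String)) (target_id : String) : Prop :=
  pvPairsOkB children_map = true ∧
  target_id ∈ pvReach children_map target_id ∧
  ∀ x ∈ pvReach children_map target_id, ∀ c ∈ pvChildren children_map x,
    c ∈ pvReach children_map target_id ∧ pvRank children_map c < pvRank children_map x

instance (children_map : List (String × List String)) (target_id : String) : Decidable (Pre_compute_subtree_depth_py children_map target_id) := by unfold Pre_compute_subtree_depth_py; infer_instance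

def pvWitness_compute_subtree_depth_py : (List (String × List String)) × String :=
  ([("b", ["c"]), ("a", ["b", "c"]), ("c", [])], "a")

def Spec_compute_subtree_depth_py (children_map : List (String × List String)) (target_id : String) (out : Int) : Prop := out = compute_subtree_depth_py_alt children_map target_id
instance (children_map : List (String × List String)) (target_id : String) (out : Int) : Decidable (Spec_compute_subtree_depth_py children_map target_id out) := by unfold Spec_compute_subtree_depth_py; infer_instance

-- ===== CLAIM (what is proved, stated in full; the proofs are below) =====
def Claim_equal_compute_subtree_depth_py : Prop := ∀ (children_map : List (String × List String)) (target_id : String), Dom_compute_subtree_depth_py children_map target_id → Pre_compute_subtree_depth_py children_map target_id → Spec_compute_subtree_depth_py children_map target_id (compute_subtree_depth_py children_map target_id)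

-- ===== LEMMAS AND PROOFS =====

-- rank is bounded by the number of entries
lemma pvRank_le (m : List (String × List String)) (x : String) : pvRank m x ≤ m.length := by
  unfold pvRank pvKeys
  calc ((m.map Prod.fst).dedup.filter (fun k => (pvReach m x).contains k)).length
      ≤ (m.map Prod.fst).dedup.length := List.length_filter_le _ _
    _ ≤ (m.map Prod.fst).length := List.Sublist.length_le (List.dedup_sublist _)
    _ = m.length := List.length_map _

-- fuel-stability of B's recursion: any fuel ≥ rank+1 computes the same value
lemma pvDepthB_stable {m : List (String × List String)} {R : List String}
    (H : ∀ x ∈ R, ∀ c ∈ pvChildren m x, c ∈ R ∧ pvRank m c < pvRank m x) :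
    ∀ f g node, node ∈ R → pvRank m node + 1 ≤ f → pvRank m node + 1 ≤ g →
      pvDepthB m f node = pvDepthB m g node := by
  intro f
  induction f with
  | zero => intro g node _ hf _; omega
  | succ f ih =>
      intro g node hn hf hg
      obtain ⟨g', rfl⟩ : ∃ g', g = g' + 1 := ⟨g - 1, by omega⟩
      simp only [pvDepthB]
      congr 1
      congr 1
      apply List.map_congr_left
      intro c hc
      obtain ⟨hcR, hclt⟩ := H node hn c hc
      exact ih g' c hcR (by omega) (by omega)

-- the number of BFS iterations consumed by the subtree of a node, fuel-guarded
def pvSize (m : List (String × List String)) : Nat → String → Nat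
  | 0, _ => 1
  | fuel + 1, node => 1 + ((pvChildren m node).map (pvSize m fuel)).sum

lemma pvSize_pos (m : List (String × List String)) (f : Nat) (node : String) :
    1 ≤ pvSize m f node := by cases f <;> simp [pvSize]

lemma pvSize_stable {m : List (String × List String)} {R : List String}
    (H : ∀ x ∈ R, ∀ c ∈ pvChildren m x, c ∈ R ∧ pvRank m c < pvRank m x) :
    ∀ f g node, node ∈ R → pvRank m node + 1 ≤ f → pvRank m node + 1 ≤ g →
      pvSize m f node = pvSize m g node := by
  intro f
  induction f with
  | zero => intro g node _ hf _; omega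
  | succ f ih =>
      intro g node hn hf hg
      obtain ⟨g', rfl⟩ : ∃ g', g = g' + 1 := ⟨g - 1, by omega⟩
      simp only [pvSize]
      congr 2
      apply List.map_congr_left
      intro c hc
      obtain ⟨hcR, hclt⟩ := H node hn c hc
      exact ih g' c hcR (by omega) (by omega)

lemma pv_init_le_foldl_maxlen (l : List (String × List String)) :
    ∀ (a : Nat), a ≤ l.foldl (fun a p => max a p.2.length) a := by
  induction l with
  | nil => intro a; simp
  | cons q rs ih => intro a; exact le_trans (le_max_left _ _) (ih _)

lemma pv_len_le_maxLen {m : List (String × List String)} {p : String × List String}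
    (hp : p ∈ m) : p.2.length ≤ pvMaxLen m := by
  unfold pvMaxLen
  suffices h : ∀ (l : List (String × List String)) (a : Nat), p ∈ l →
      p.2.length ≤ l.foldl (fun a p => max a p.2.length) a from h m 0 hp
  intro l
  induction l with
  | nil => intro a h; simp at h
  | cons q rs ih =>
      intro a h
      rw [List.mem_cons] at h
      rcases h with h | h
      · subst h
        exact le_trans (le_max_right _ _) (pv_init_le_foldl_maxlen rs _)
      · exact ih _ h

lemma pv_lookup_mem {m : List (String × List String)} {node : String} {cs : List String}
    (h : (PySem.Dict.mk m).get? node = some cs) : ∃ p ∈ m, p.2 = cs := by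
  induction m with
  | nil => simp [PySem.Dict.get?] at h
  | cons p rest ih =>
      rw [PySem.Dict.get?_mk_cons] at h
      by_cases hk : (p.1 == node) = true
      · simp only [hk, if_pos] at h
        exact ⟨p, List.mem_cons_self, by simpa using h⟩
      · simp only [hk] at h
        obtain ⟨q, hq, hv⟩ := ih h
        exact ⟨q, List.mem_cons_of_mem _ hq, hv⟩

lemma pv_children_len_le (m : List (String × List String)) (node : String) :
    (pvChildren m node).length ≤ pvMaxLen m := by
  unfold pvChildren
  rw [PySem.Dict.getD_eq_get?_getD]
  cases hlk : (PySem.Dict.mk m).get? node with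
  | none => simp
  | some cs =>
      simp only [Option.getD_some]
      obtain ⟨p, hp, hv⟩ := pv_lookup_mem hlk
      exact hv ▸ pv_len_le_maxLen hp

lemma pvSize_le (m : List (String × List String)) :
    ∀ f node, pvSize m f node ≤ (pvMaxLen m + 1) ^ f := by
  intro f
  induction f with
  | zero => intro node; simp [pvSize]
  | succ f ih =>
      intro node
      simp only [pvSize]
      have h1 : ((pvChildren m node).map (pvSize m f)).sum ≤
          (pvChildren m node).length * (pvMaxLen m + 1) ^ f := by
        have := List.sum_le_card_nsmul ((pvChildren m node).map (pvSize m f)) ((pvMaxLen m + 1) ^ f)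
          (by intro x hx; obtain ⟨c, _, rfl⟩ := List.mem_map.1 hx; exact ih c)
        simpa [smul_eq_mul] using this
      have h2 := pv_children_len_le m node
      have h3 : (1 : Nat) ≤ (pvMaxLen m + 1) ^ f := Nat.one_le_pow _ _ (by omega)
      calc 1 + ((pvChildren m node).map (pvSize m f)).sum
          ≤ 1 + pvMaxLen m * (pvMaxLen m + 1) ^ f := by
            have := Nat.mul_le_mul h2 (le_refl ((pvMaxLen m + 1) ^ f)); omega
        _ ≤ (pvMaxLen m + 1) ^ (f + 1) := by
            rw [pow_succ]; nlinarith

-- generic foldl-max machinery over Int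
lemma pv_fm_pull {α : Type} (f : α → Int) (Q : List α) (a b : Int) :
    Q.foldl (fun x p => max x (f p)) (max a b) = max a (Q.foldl (fun x p => max x (f p)) b) := by
  induction Q generalizing b with
  | nil => rfl
  | cons q Q ih =>
      simp only [List.foldl_cons, max_assoc]
      exact ih (max b (f q))

lemma pv_fm_pull' {α : Type} (f : α → Int) (Q : List α) (a b : Int) :
    Q.foldl (fun x p => max x (f p)) (max a b) = max (Q.foldl (fun x p => max x (f p)) a) b := by
  rw [max_comm a b, pv_fm_pull, max_comm]

lemma pv_fm_comm {α : Type} (f : α → Int) (Q1 Q2 : List α) (i : Int) :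
    Q1.foldl (fun x p => max x (f p)) (Q2.foldl (fun x p => max x (f p)) i) =
    Q2.foldl (fun x p => max x (f p)) (Q1.foldl (fun x p => max x (f p)) i) := by
  induction Q2 generalizing i with
  | nil => rfl
  | cons q Q2 ih =>
      simp only [List.foldl_cons]
      rw [← pv_fm_pull' f Q1 i (f q), ih]

lemma pv_le_foldl_max (l : List Int) (a : Int) : a ≤ l.foldl max a := by
  induction l generalizing a with
  | nil => simp
  | cons x l ih => exact le_trans (le_max_left a x) (ih _)

lemma pvDepthB_pos (m : List (String × List String)) (f : Nat) (node : String) :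
    1 ≤ pvDepthB m f node := by
  cases f with
  | zero => simp [pvDepthB]
  | succ f =>
      simp only [pvDepthB]
      have := pv_le_foldl_max (((pvChildren m node).map (pvDepthB m f))) 0
      omega

-- abbreviations used by the invariant
def pvD (m : List (String × List String)) (node : String) : Int :=
  pvDepthB m (m.length + 1) node

def pvM (m : List (String × List String)) (Q : List (String × Int)) (md : Int) : Int :=
  Q.foldl (fun x p => max x (p.2 - 1 + pvD m p.1)) md

lemma pv_G (m : List (String × List String)) (d : Int) :
    ∀ (cs : List String) (j a : Int),
      (cs.map (fun c => (c, d + 1))).foldl (fun x p => max x (p.2 - 1 + pvD m p.1)) (max j (d + a)) =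
      max j (d + cs.foldl (fun x c => max x (pvD m c)) a) := by
  intro cs
  induction cs with
  | nil => intro j a; rfl
  | cons c cs ih =>
      intro j a
      simp only [List.map_cons, List.foldl_cons]
      have h1 : max (max j (d + a)) (d + 1 - 1 + pvD m c) = max j (d + max a (pvD m c)) := by
        have : d + 1 - 1 + pvD m c = d + pvD m c := by ring
        rw [this, max_assoc]
        congr 1
        omega
      rw [h1, ih]

-- pvD unfolds through one level of children
lemma pvD_unfold {m : List (String × List String)} {R : List String} {node : String}
    (hn : node ∈ R)
    (H : ∀ x ∈ R, ∀ c ∈ pvChildren m x, c ∈ R ∧ pvRank m c < pvRank m x) :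
    pvD m node = 1 + ((pvChildren m node).map (pvD m)).foldl max 0 := by
  unfold pvD
  conv_lhs => rw [pvDepthB]
  congr 1
  congr 1
  apply List.map_congr_left
  intro c hc
  obtain ⟨hcR, hclt⟩ := H node hn c hc
  have h1 := pvRank_le m node
  exact pvDepthB_stable H _ _ c hcR (by omega) (by omega)

-- BFS loop invariant: with enough fuel, the loop computes md ⊔ max over the queue of (d-1+depth)
lemma pvBfsA_eq_M {m : List (String × List String)} {R : List String}
    (H : ∀ x ∈ R, ∀ c ∈ pvChildren m x, c ∈ R ∧ pvRank m c < pvRank m x) :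
    ∀ (fuel : Nat) (Q : List (String × Int)) (md : Int),
      (∀ p ∈ Q, p.1 ∈ R) →
      (Q.map (fun p => pvSize m (m.length + 1) p.1)).sum ≤ fuel →
      pvBfsA m fuel Q md = pvM m Q md := by
  intro fuel
  induction fuel with
  | zero =>
      intro Q md _ hw
      cases Q with
      | nil => rfl
      | cons p rest =>
          exfalso
          simp only [List.map_cons, List.sum_cons] at hw
          have := pvSize_pos m (m.length + 1) p.1
          omega
  | succ fuel ih =>
      intro Q md hQ hw
      cases Q with
      | nil => rfl
      | cons p rest =>
          obtain ⟨current, d⟩ := p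
          have hcur : current ∈ R := hQ (current, d) List.mem_cons_self
          simp only [pvBfsA]
          set cs : List String := pvChildren m current with hcs
          -- fuel accounting
          have hsz : pvSize m (m.length + 1) current = 1 + (cs.map (pvSize m (m.length + 1))).sum := by
            conv_lhs => rw [pvSize]
            congr 2
            apply List.map_congr_left
            intro c hc
            obtain ⟨hcR, hclt⟩ := H current hcur c (hcs ▸ hc)
            have := pvRank_le m current
            exact pvSize_stable H _ _ c hcR (by omega) (by omega)
          have hw' : ((rest ++ cs.map (fun c => (c, d + 1))).map
              (fun p => pvSize m (m.length + 1) p.1)).sum ≤ fuel := by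
            simp only [List.map_cons, List.sum_cons] at hw
            rw [hsz] at hw
            simp only [List.map_append, List.sum_append, List.map_map]
            rw [show ((fun p : String × Int => pvSize m (m.length + 1) p.1) ∘ fun c => (c, d + 1))
                = pvSize m (m.length + 1) from rfl]
            omega
          have hQ' : ∀ p ∈ rest ++ cs.map (fun c => (c, d + 1)), p.1 ∈ R := by
            intro p hp
            rcases List.mem_append.1 hp with hp | hp
            · exact hQ p (List.mem_cons_of_mem _ hp)
            · obtain ⟨c, hc, rfl⟩ := List.mem_map.1 hp
              exact (H current hcur c (hcs ▸ hc)).1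
          rw [ih _ _ hQ' hw']
          -- rearrange the fold
          unfold pvM
          rw [List.foldl_append, pv_fm_comm]
          simp only [List.foldl_cons]
          have hinit : (max md d) = max md (d + 0) := by omega
          rw [hinit, pv_G m d cs md 0]
          congr 1
          congr 1
          have hB : pvD m current = 1 + cs.foldl (fun x c => max x (pvD m c)) 0 := by
            rw [pvD_unfold hcur H]
            congr 1
            simp only [hcs]
            rw [List.foldl_map]
          rw [hB]
          ring

lemma pv_main {m : List (String × List String)} {t : String}
    (hpre : Pre_compute_subtree_depth_py m t) :
    compute_subtree_depth_py m t = compute_subtree_depth_py_alt m t := by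
  obtain ⟨-, htR, H⟩ := hpre
  unfold compute_subtree_depth_py
  have hw : (([(t, (1 : Int))]).map (fun p => pvSize m (m.length + 1) p.1)).sum ≤ pvFuelA m := by
    simp only [List.map_cons, List.map_nil, List.sum_cons, List.sum_nil, add_zero]
    exact le_trans (pvSize_le m (m.length + 1) t) (le_of_eq rfl)
  have hQ : ∀ p ∈ [(t, (1 : Int))], p.1 ∈ pvReach m t := by
    intro p hp
    simp only [List.mem_singleton] at hp
    subst hp
    exact htR
  rw [pvBfsA_eq_M H _ _ _ hQ hw]
  unfold pvM
  simp only [List.foldl_cons, List.foldl_nil]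
  have hpos := pvDepthB_pos m (m.length + 1) t
  unfold compute_subtree_depth_py_alt
  have : (1 : Int) - 1 + pvD m t = pvD m t := by ring
  rw [this]
  unfold pvD
  omega

-- ===== VERDICT (by name: the statement is the Claim_ definition above) =====
theorem compute_subtree_depth_py_spec : Claim_equal_compute_subtree_depth_py := by
  intro m t _ hpre
  unfold Spec_compute_subtree_depth_py
  exact pv_main hpre
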